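-- pv_equiv track=rewrite | github.com/adam-rabinowitz/triC | generate_trimeric_bw.py | find_trimer_fragments
-- ===== SOURCE A (Python) =====
-- import collections
--
-- def find_overlaps(
--     query, subjects
-- ):
--     indices = set()
--     for index, subject in enumerate(subjects):
--         if query[0] != subject[0]:
--             continue
--         if query[1] >= subject[2]:
--             continue
--         if query[2] <= subject[1]:
--             continue
--         indices.add(index)
--     return(indices)
--
-- def find_trimer_fragments(
--     region1, region2, trimers
-- ):
--     # Create output variable
--     all_fragments = []
--     counts = collections.OrderedDict([
--         ('region1', 0), ('region2', 0), ('both', 0)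
--     ])
--     # Find overlaps
--     for trimer in trimers.values():
--         # Check for overlaps with region1
--         region1_overlaps = find_overlaps(region1, trimer)
--         region1_match = bool(region1_overlaps)
--         region2_overlaps = find_overlaps(region2, trimer)
--         region2_match = bool(region2_overlaps)
--         # Count matches
--         if region1_match:
--             counts['region1'] += 1
--         if region2_match:
--             counts['region2'] += 1
--         if region1_match & region2_match:
--             counts['both'] += 1
--         else:
--             continue
--         # Extract additional fragments to both overlapping regions
--         overlap_indices = region1_overlaps.union(region2_overlaps)
--         fragments = [
--             fragment
--             for index, fragment in enumerate(trimer)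
--             if index not in overlap_indices
--         ]
--         all_fragments.extend(fragments)
--     return(all_fragments, counts)
-- ===== SOURCE B (Python) =====
-- import collections
--
-- def find_trimer_fragments(region1, region2, trimers):
--     # Single pass per trimer: inline overlap tests, OR-ed match flags,
--     # plain integer counters instead of index sets and a counts dict.
--     all_fragments = []
--     n1 = n2 = nboth = 0
--     for trimer in trimers.values():
--         r1 = r2 = False
--         kept = []
--         for frag in trimer:
--             o1 = frag[0] == region1[0] and region1[1] < frag[2] and frag[1] < region1[2]
--             o2 = frag[0] == region2[0] and region2[1] < frag[2] and frag[1] < region2[2]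
--             r1 = r1 or o1
--             r2 = r2 or o2
--             if not (o1 or o2):
--                 kept.append(frag)
--         n1 += r1
--         n2 += r2
--         if r1 and r2:
--             nboth += 1
--             all_fragments.extend(kept)
--     return all_fragments, collections.OrderedDict(
--         [('region1', n1), ('region2', n2), ('both', nboth)]
--     )
-- ===== Notes on version B (the rewrite author's own statement) =====
-- stated objective: simpler
-- what changed: One pass over each trimer with two OR-ed boolean flags, inlined overlap tests, plain integer counters and a locally collected kept-list, replacing the helper that builds two index sets per trimer, their union, and a second enumerate-filter pass plus dict mutation.
import Mathlib
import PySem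

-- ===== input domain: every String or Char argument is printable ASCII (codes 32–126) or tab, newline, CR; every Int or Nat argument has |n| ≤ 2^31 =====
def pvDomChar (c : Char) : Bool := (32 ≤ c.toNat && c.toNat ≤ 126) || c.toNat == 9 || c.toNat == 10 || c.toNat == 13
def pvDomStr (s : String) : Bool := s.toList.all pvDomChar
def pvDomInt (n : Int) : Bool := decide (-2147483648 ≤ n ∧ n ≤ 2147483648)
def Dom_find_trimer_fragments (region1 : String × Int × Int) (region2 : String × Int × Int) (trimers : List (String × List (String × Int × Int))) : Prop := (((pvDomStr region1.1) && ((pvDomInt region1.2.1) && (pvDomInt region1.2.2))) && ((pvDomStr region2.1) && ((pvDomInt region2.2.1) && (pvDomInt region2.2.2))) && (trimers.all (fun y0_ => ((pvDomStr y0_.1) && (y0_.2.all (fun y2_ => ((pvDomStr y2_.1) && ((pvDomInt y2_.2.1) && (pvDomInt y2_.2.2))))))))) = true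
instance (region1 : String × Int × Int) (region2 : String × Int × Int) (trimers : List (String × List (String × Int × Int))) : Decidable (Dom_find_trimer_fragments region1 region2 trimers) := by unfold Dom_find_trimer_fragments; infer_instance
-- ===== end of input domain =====

-- B replaces A's per-trimer index-set construction (find_overlaps twice, union, enumerate-filter)
-- with a single pass per trimer keeping two OR-ed match flags and plain integer counters (objective: simpler).


-- ===== PORT A =====
def find_overlaps (query : String × Int × Int) (subjects : List (String × Int × Int)) : PySem.Set Int :=
  (PySem.List.enumerate subjects 0).foldl (fun indices p =>
    if query.1 != p.2.1 then indices
    else if query.2.1 ≥ p.2.2.2 then indices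
    else if query.2.2 ≤ p.2.2.1 then indices
    else PySem.Set.add indices p.1) PySem.Set.empty

def find_trimer_fragments (region1 : String × Int × Int) (region2 : String × Int × Int) (trimers : List (String × List (String × Int × Int))) : (List (String × Int × Int)) × (List (String × Int)) :=
  let init : (List (String × Int × Int)) × PySem.Dict String Int :=
    ([], PySem.Dict.ofList [("region1", 0), ("region2", 0), ("both", 0)])
  let res := (PySem.Dict.ofList trimers).values.foldl (fun st trimer =>
    let region1_overlaps := find_overlaps region1 trimer
    let region1_match := !region1_overlaps.isEmpty
    let region2_overlaps := find_overlaps region2 trimer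
    let region2_match := !region2_overlaps.isEmpty
    let counts := if region1_match then st.2.modify "region1" 0 (· + 1) else st.2
    let counts := if region2_match then counts.modify "region2" 0 (· + 1) else counts
    if region1_match && region2_match then
      let counts := counts.modify "both" 0 (· + 1)
      let overlap_indices := PySem.Set.union region1_overlaps region2_overlaps
      let fragments := ((PySem.List.enumerate trimer 0).filter
        (fun p => !(PySem.Set.contains overlap_indices p.1))).map (·.2)
      (st.1 ++ fragments, counts)
    else (st.1, counts)) init
  (res.1, res.2.items)

-- ===== PORT B =====
def fragOverlaps (r : String × Int × Int) (f : String × Int × Int) : Bool :=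
  f.1 == r.1 && r.2.1 < f.2.2 && f.2.1 < r.2.2

def scanTrimer (region1 region2 : String × Int × Int) (trimer : List (String × Int × Int)) :
    Bool × Bool × List (String × Int × Int) :=
  trimer.foldl (fun st f =>
    let o1 := fragOverlaps region1 f
    let o2 := fragOverlaps region2 f
    (st.1 || o1, st.2.1 || o2, if !(o1 || o2) then st.2.2 ++ [f] else st.2.2))
    (false, false, [])

def find_trimer_fragments_alt (region1 : String × Int × Int) (region2 : String × Int × Int) (trimers : List (String × List (String × Int × Int))) : (List (String × Int × Int)) × (List (String × Int)) :=
  let res := (PySem.Dict.ofList trimers).values.foldl (fun st trimer =>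
    let (r1, r2, kept) := scanTrimer region1 region2 trimer
    ((if r1 && r2 then st.1 ++ kept else st.1),
     st.2.1 + (if r1 then 1 else 0),
     st.2.2.1 + (if r2 then 1 else 0),
     st.2.2.2 + (if r1 && r2 then 1 else 0)))
    (([] : List (String × Int × Int)), (0 : Int), (0 : Int), (0 : Int))
  (res.1, [("region1", res.2.1), ("region2", res.2.2.1), ("both", res.2.2.2)])

-- ===== PRECONDITION & SPEC =====
def Spec_find_trimer_fragments (region1 : String × Int × Int) (region2 : String × Int × Int) (trimers : List (String × List (String × Int × Int))) (out : (List (String × Int × Int)) × (List (String × Int))) : Prop := out = find_trimer_fragments_alt region1 region2 trimers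
instance (region1 : String × Int × Int) (region2 : String × Int × Int) (trimers : List (String × List (String × Int × Int))) (out : (List (String × Int × Int)) × (List (String × Int))) : Decidable (Spec_find_trimer_fragments region1 region2 trimers out) := by unfold Spec_find_trimer_fragments; infer_instance

-- ===== CLAIM (what is proved, stated in full; the proofs are below) =====
def Claim_equal_find_trimer_fragments : Prop := ∀ (region1 : String × Int × Int) (region2 : String × Int × Int) (trimers : List (String × List (String × Int × Int))), Dom_find_trimer_fragments region1 region2 trimers → Spec_find_trimer_fragments region1 region2 trimers (find_trimer_fragments region1 region2 trimers)

-- ===== LEMMAS AND PROOFS =====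

-- A's branch chain adds the index exactly when B's fragOverlaps test holds
theorem foStep_eq (q : String × Int × Int) (p : Int × (String × Int × Int)) (s : PySem.Set Int) :
    (if q.1 != p.2.1 then s else if q.2.1 ≥ p.2.2.2 then s
     else if q.2.2 ≤ p.2.2.1 then s else PySem.Set.add s p.1)
    = if fragOverlaps q p.2 then PySem.Set.add s p.1 else s := by
  by_cases h1 : q.1 = p.2.1
  · by_cases h2 : q.2.1 ≥ p.2.2.2
    · simp [fragOverlaps, bne, h1, h2, not_lt.2 h2]
    · by_cases h3 : q.2.2 ≤ p.2.2.1
      · simp [fragOverlaps, bne, h1, h3, not_lt.2 h3]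
      · simp [fragOverlaps, bne, h1, h2, h3, not_le.1 h2, not_le.1 h3]
  · simp [fragOverlaps, bne, h1, Ne.symm h1]

theorem mem_fo_fold (q : String × Int × Int) (t : List (String × Int × Int)) :
    ∀ (s : Int) (acc : PySem.Set Int) (i : Int),
    i ∈ (PySem.List.enumerate t s).foldl (fun indices p =>
      if q.1 != p.2.1 then indices else if q.2.1 ≥ p.2.2.2 then indices
      else if q.2.2 ≤ p.2.2.1 then indices else PySem.Set.add indices p.1) acc
    ↔ i ∈ acc ∨ ∃ (k : Nat) (h : k < t.length), i = s + k ∧ fragOverlaps q t[k] := by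
  induction t with
  | nil => intro s acc i; simp [PySem.List.enumerate_nil]
  | cons f rest ih =>
    intro s acc i
    rw [PySem.List.enumerate_cons, List.foldl_cons, foStep_eq, ih]
    constructor
    · rintro (hmem | ⟨k, hk, rfl, hov⟩)
      · by_cases hf : fragOverlaps q f
        · simp only [hf, if_true] at hmem
          rcases (PySem.Set.mem_add _ _ _).1 hmem with h | h
          · exact Or.inl h
          · exact Or.inr ⟨0, by simp, by simpa using h, by simpa using hf⟩
        · simp only [hf, if_false, Bool.false_eq_true] at hmem; exact Or.inl hmem
      · refine Or.inr ⟨k + 1, by simp only [List.length_cons]; omega, by push_cast; ring, by simpa using hov⟩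
    · rintro (hmem | ⟨k, hk, rfl, hov⟩)
      · refine Or.inl ?_
        split
        · exact (PySem.Set.mem_add _ _ _).2 (Or.inl hmem)
        · exact hmem
      · match k, hk, hov with
        | 0, hk, hov =>
          refine Or.inl ?_
          have hov' : fragOverlaps q f = true := by simpa using hov
          simp only [hov', if_true]
          exact (PySem.Set.mem_add _ _ _).2 (Or.inr (by push_cast; ring))
        | k + 1, hk, hov =>
          refine Or.inr ⟨k, by simp only [List.length_cons] at hk; omega,
            by push_cast; ring, by simpa using hov⟩

theorem mem_find_overlaps (q : String × Int × Int) (t : List (String × Int × Int)) (i : Int) :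
    i ∈ find_overlaps q t ↔ ∃ (k : Nat) (h : k < t.length), i = k ∧ fragOverlaps q t[k] := by
  unfold find_overlaps
  rw [mem_fo_fold]
  simp [PySem.Set.empty]

theorem find_overlaps_isEmpty (q : String × Int × Int) (t : List (String × Int × Int)) :
    (!(find_overlaps q t).isEmpty) = t.any (fragOverlaps q) := by
  by_cases h : t.any (fragOverlaps q)
  · rcases List.any_eq_true.1 h with ⟨x, hx, hov⟩
    rcases List.mem_iff_getElem.1 hx with ⟨k, hk, rfl⟩
    have : ((k : Int)) ∈ find_overlaps q t :=
      (mem_find_overlaps q t k).2 ⟨k, hk, rfl, hov⟩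
    have hne : find_overlaps q t ≠ [] := by
      intro hnil; rw [hnil] at this; simp at this
    simp [h, hne]
  · have hnil : find_overlaps q t = [] := by
      by_contra hne
      rcases List.exists_mem_of_ne_nil _ hne with ⟨i, hi⟩
      rcases (mem_find_overlaps q t i).1 hi with ⟨k, hk, rfl, hov⟩
      exact h (List.any_eq_true.2 ⟨t[k], List.getElem_mem hk, hov⟩)
    simp [h, hnil]

theorem contains_union_idx (r1 r2 : String × Int × Int) (t : List (String × Int × Int))
    (k : Nat) (hk : k < t.length) :
    (PySem.Set.union (find_overlaps r1 t) (find_overlaps r2 t)).contains ((0 : Int) + k)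
    = (fragOverlaps r1 t[k] || fragOverlaps r2 t[k]) := by
  rw [Bool.eq_iff_iff, PySem.Set.contains_iff]
  rw [show ((0 : Int) + k) = (k : Int) by ring]
  rw [PySem.Set.mem_union, mem_find_overlaps, mem_find_overlaps]
  constructor
  · rintro (⟨k', hk', hek, hov⟩ | ⟨k', hk', hek, hov⟩) <;>
      ( have : k' = k := by exact_mod_cast hek.symm
        subst this ) <;> simp [hov]
  · intro hor
    rcases Bool.or_eq_true_iff.1 hor with h | h
    · exact Or.inl ⟨k, hk, rfl, h⟩
    · exact Or.inr ⟨k, hk, rfl, h⟩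

theorem filt_enum (P : (String × Int × Int) → Bool) (t : List (String × Int × Int)) :
    ∀ (s : Int) (u : PySem.Set Int),
    (∀ (k : Nat) (hk : k < t.length), u.contains (s + k) = P t[k]) →
    ((PySem.List.enumerate t s).filter (fun p => !(u.contains p.1))).map (·.2)
      = t.filter (fun f => !(P f)) := by
  induction t with
  | nil => intro s u _; simp [PySem.List.enumerate_nil]
  | cons f rest ih =>
    intro s u h
    have h0 : u.contains s = P f := by simpa using h 0 (by simp)
    have hrec := ih (s + 1) u (fun k hk => by
      have h' := h (k + 1) (by simp only [List.length_cons]; omega)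
      rw [show ((k + 1 : Nat) : Int) = (k : Int) + 1 by push_cast; ring] at h'
      rw [show s + ((k : Int) + 1) = (s + 1) + k by ring] at h'
      simpa using h')
    rw [PySem.List.enumerate_cons, List.filter_cons, List.filter_cons]
    simp only [h0]
    cases hp : P f <;> simp only [Bool.not_false, Bool.not_true, Bool.false_eq_true,
      if_true, if_false, List.map_cons, hrec]

theorem scan_fold (r1 r2 : String × Int × Int) (t : List (String × Int × Int)) :
    ∀ (b1 b2 : Bool) (acc : List (String × Int × Int)),
    t.foldl (fun st f =>
      let o1 := fragOverlaps r1 f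
      let o2 := fragOverlaps r2 f
      (st.1 || o1, st.2.1 || o2, if !(o1 || o2) then st.2.2 ++ [f] else st.2.2))
      (b1, b2, acc)
    = (b1 || t.any (fragOverlaps r1), b2 || t.any (fragOverlaps r2),
       acc ++ t.filter (fun f => !(fragOverlaps r1 f || fragOverlaps r2 f))) := by
  induction t with
  | nil => intro b1 b2 acc; simp
  | cons f rest ih =>
    intro b1 b2 acc
    rw [List.foldl_cons]
    show rest.foldl _ (b1 || fragOverlaps r1 f, b2 || fragOverlaps r2 f,
      if !(fragOverlaps r1 f || fragOverlaps r2 f) then acc ++ [f] else acc) = _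
    rw [ih]
    cases h1 : fragOverlaps r1 f <;> cases h2 : fragOverlaps r2 f <;>
      simp [h1, h2]

theorem scan_spec (r1 r2 : String × Int × Int) (t : List (String × Int × Int)) :
    scanTrimer r1 r2 t
      = (t.any (fragOverlaps r1), t.any (fragOverlaps r2),
         t.filter (fun f => !(fragOverlaps r1 f || fragOverlaps r2 f))) := by
  unfold scanTrimer
  rw [scan_fold]
  simp

def cdict (a b c : Int) : PySem.Dict String Int :=
  PySem.Dict.mk [("region1", a), ("region2", b), ("both", c)]

theorem cdict_modify1 (a b c : Int) (f : Int → Int) :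
    (cdict a b c).modify "region1" 0 f = cdict (f a) b c := by rfl

theorem cdict_modify2 (a b c : Int) (f : Int → Int) :
    (cdict a b c).modify "region2" 0 f = cdict a (f b) c := by rfl

theorem cdict_modify3 (a b c : Int) (f : Int → Int) :
    (cdict a b c).modify "both" 0 f = cdict a b (f c) := by rfl

-- named copies of the two fold bodies (definitionally equal to the lambdas in the ports)
def stepAfun (region1 region2 : String × Int × Int) :
    (List (String × Int × Int)) × PySem.Dict String Int → List (String × Int × Int) →
    (List (String × Int × Int)) × PySem.Dict String Int :=
  fun st trimer =>
    let region1_overlaps := find_overlaps region1 trimer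
    let region1_match := !region1_overlaps.isEmpty
    let region2_overlaps := find_overlaps region2 trimer
    let region2_match := !region2_overlaps.isEmpty
    let counts := if region1_match then st.2.modify "region1" 0 (· + 1) else st.2
    let counts := if region2_match then counts.modify "region2" 0 (· + 1) else counts
    if region1_match && region2_match then
      let counts := counts.modify "both" 0 (· + 1)
      let overlap_indices := PySem.Set.union region1_overlaps region2_overlaps
      let fragments := ((PySem.List.enumerate trimer 0).filter
        (fun p => !(PySem.Set.contains overlap_indices p.1))).map (·.2)
      (st.1 ++ fragments, counts)
    else (st.1, counts)

def stepBfun (region1 region2 : String × Int × Int) :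
    (List (String × Int × Int)) × Int × Int × Int → List (String × Int × Int) →
    (List (String × Int × Int)) × Int × Int × Int :=
  fun st trimer =>
    let (r1, r2, kept) := scanTrimer region1 region2 trimer
    ((if r1 && r2 then st.1 ++ kept else st.1),
     st.2.1 + (if r1 then 1 else 0),
     st.2.2.1 + (if r2 then 1 else 0),
     st.2.2.2 + (if r1 && r2 then 1 else 0))

theorem fragments_eq (region1 region2 : String × Int × Int) (t : List (String × Int × Int)) :
    ((PySem.List.enumerate t 0).filter (fun p =>
        !((PySem.Set.union (find_overlaps region1 t) (find_overlaps region2 t)).contains p.1))).map (·.2)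
      = t.filter (fun f => !(fragOverlaps region1 f || fragOverlaps region2 f)) := by
  exact filt_enum _ t 0 _ (fun k hk => contains_union_idx region1 region2 t k hk)

theorem stepA_eq (region1 region2 : String × Int × Int)
    (all : List (String × Int × Int)) (a b c : Int) (t : List (String × Int × Int)) :
    (fun (st : (List (String × Int × Int)) × PySem.Dict String Int) trimer =>
      let region1_overlaps := find_overlaps region1 trimer
      let region1_match := !region1_overlaps.isEmpty
      let region2_overlaps := find_overlaps region2 trimer
      let region2_match := !region2_overlaps.isEmpty
      let counts := if region1_match then st.2.modify "region1" 0 (· + 1) else st.2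
      let counts := if region2_match then counts.modify "region2" 0 (· + 1) else counts
      if region1_match && region2_match then
        let counts := counts.modify "both" 0 (· + 1)
        let overlap_indices := PySem.Set.union region1_overlaps region2_overlaps
        let fragments := ((PySem.List.enumerate trimer 0).filter
          (fun p => !(PySem.Set.contains overlap_indices p.1))).map (·.2)
        (st.1 ++ fragments, counts)
      else (st.1, counts)) (all, cdict a b c) t
    = ((if t.any (fragOverlaps region1) && t.any (fragOverlaps region2) then
          all ++ t.filter (fun f => !(fragOverlaps region1 f || fragOverlaps region2 f)) else all),
       cdict (if t.any (fragOverlaps region1) then a + 1 else a)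
             (if t.any (fragOverlaps region2) then b + 1 else b)
             (if t.any (fragOverlaps region1) && t.any (fragOverlaps region2) then c + 1 else c)) := by
  simp only [find_overlaps_isEmpty]
  cases hm1 : t.any (fragOverlaps region1) <;> cases hm2 : t.any (fragOverlaps region2) <;>
    simp [cdict_modify1, cdict_modify2, cdict_modify3]
  have h := fragments_eq region1 region2 t
  simpa using h

theorem stepB_eq (region1 region2 : String × Int × Int)
    (all : List (String × Int × Int)) (a b c : Int) (t : List (String × Int × Int)) :
    (fun (st : (List (String × Int × Int)) × Int × Int × Int) trimer =>
      let (r1, r2, kept) := scanTrimer region1 region2 trimer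
      ((if r1 && r2 then st.1 ++ kept else st.1),
       st.2.1 + (if r1 then 1 else 0),
       st.2.2.1 + (if r2 then 1 else 0),
       st.2.2.2 + (if r1 && r2 then 1 else 0))) (all, a, b, c) t
    = ((if t.any (fragOverlaps region1) && t.any (fragOverlaps region2) then
          all ++ t.filter (fun f => !(fragOverlaps region1 f || fragOverlaps region2 f)) else all),
       (if t.any (fragOverlaps region1) then a + 1 else a),
       (if t.any (fragOverlaps region2) then b + 1 else b),
       (if t.any (fragOverlaps region1) && t.any (fragOverlaps region2) then c + 1 else c)) := by
  simp only [scan_spec]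
  cases hm1 : t.any (fragOverlaps region1) <;> cases hm2 : t.any (fragOverlaps region2) <;> simp

theorem loop_eq (region1 region2 : String × Int × Int)
    (ts : List (List (String × Int × Int))) :
    ∀ (all : List (String × Int × Int)) (a b c : Int),
    ts.foldl (fun (st : (List (String × Int × Int)) × PySem.Dict String Int) trimer =>
      let region1_overlaps := find_overlaps region1 trimer
      let region1_match := !region1_overlaps.isEmpty
      let region2_overlaps := find_overlaps region2 trimer
      let region2_match := !region2_overlaps.isEmpty
      let counts := if region1_match then st.2.modify "region1" 0 (· + 1) else st.2
      let counts := if region2_match then counts.modify "region2" 0 (· + 1) else counts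
      if region1_match && region2_match then
        let counts := counts.modify "both" 0 (· + 1)
        let overlap_indices := PySem.Set.union region1_overlaps region2_overlaps
        let fragments := ((PySem.List.enumerate trimer 0).filter
          (fun p => !(PySem.Set.contains overlap_indices p.1))).map (·.2)
        (st.1 ++ fragments, counts)
      else (st.1, counts)) (all, cdict a b c)
    = (fun (r : (List (String × Int × Int)) × Int × Int × Int) => (r.1, cdict r.2.1 r.2.2.1 r.2.2.2))
      (ts.foldl (fun (st : (List (String × Int × Int)) × Int × Int × Int) trimer =>
        let (r1, r2, kept) := scanTrimer region1 region2 trimer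
        ((if r1 && r2 then st.1 ++ kept else st.1),
         st.2.1 + (if r1 then 1 else 0),
         st.2.2.1 + (if r2 then 1 else 0),
         st.2.2.2 + (if r1 && r2 then 1 else 0))) (all, a, b, c)) := by
  induction ts with
  | nil => intro all a b c; rfl
  | cons t rest ih =>
    intro all a b c
    have hA := stepA_eq region1 region2 all a b c t
    have hB := stepB_eq region1 region2 all a b c t
    rw [List.foldl_cons, List.foldl_cons]
    exact (congrArg (fun s => List.foldl (stepAfun region1 region2) s rest) hA).trans
      ((ih _ _ _ _).trans (congrArg (fun (r : (List (String × Int × Int)) × Int × Int × Int) =>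
          (r.1, cdict r.2.1 r.2.2.1 r.2.2.2))
        (congrArg (fun s => List.foldl (stepBfun region1 region2) s rest) hB.symm)))

-- ===== VERDICT (by name: the statement is the Claim_ definition above) =====
theorem find_trimer_fragments_spec : Claim_equal_find_trimer_fragments := by
  intro region1 region2 trimers _
  unfold Spec_find_trimer_fragments
  exact congrArg (fun r => (r.1, PySem.Dict.items r.2))
    (loop_eq region1 region2 ((PySem.Dict.ofList trimers).values) [] 0 0 0)
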